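-- pv_equiv track=rewrite | github.com/jzhoubu/Solution-Tianchi-MeinianAI-Rank4 | scr/NLPprocess/data_helper/segment.py | get_max_counts_and_length
-- ===== SOURCE A (Python) =====
-- def get_max_counts_and_length(sentence_data):
--     """
--         计算分词后数据的最大句子数量与最大句子长度(词数量)
--     :param sentence_data: [[[xx, xx, xx], [xx, xx]], [[xx], [xxx,xx]]]
--     :return:
--     """
--     max_count, max_length = 0, 0
--     for sentence_list in sentence_data:
--         count = len(sentence_list)
--         max_count = max(count, max_count)
--         for sentence in sentence_list:
--             length = len(sentence)
--             max_length = max(length, max_length)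
--     return max_count, max_length
-- ===== SOURCE B (Python) =====
-- def get_max_counts_and_length(sentence_data):
--     if not sentence_data:
--         return 0, 0
--     if len(sentence_data) == 1:
--         sentence_list = sentence_data[0]
--         return len(sentence_list), max(map(len, sentence_list), default=0)
--     mid = len(sentence_data) // 2
--     c1, l1 = get_max_counts_and_length(sentence_data[:mid])
--     c2, l2 = get_max_counts_and_length(sentence_data[mid:])
--     return max(c1, c2), max(l1, l2)
-- ===== Notes on version B (the rewrite author's own statement) =====
-- stated objective: alternative
-- what changed: Replaces A's single fused left-to-right loop with mutable accumulators by a divide-and-conquer recursion: split the outer list in half, recurse on each half, and combine the two (count, length) pairs with max; the base case handles one record directly.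
import Mathlib
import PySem

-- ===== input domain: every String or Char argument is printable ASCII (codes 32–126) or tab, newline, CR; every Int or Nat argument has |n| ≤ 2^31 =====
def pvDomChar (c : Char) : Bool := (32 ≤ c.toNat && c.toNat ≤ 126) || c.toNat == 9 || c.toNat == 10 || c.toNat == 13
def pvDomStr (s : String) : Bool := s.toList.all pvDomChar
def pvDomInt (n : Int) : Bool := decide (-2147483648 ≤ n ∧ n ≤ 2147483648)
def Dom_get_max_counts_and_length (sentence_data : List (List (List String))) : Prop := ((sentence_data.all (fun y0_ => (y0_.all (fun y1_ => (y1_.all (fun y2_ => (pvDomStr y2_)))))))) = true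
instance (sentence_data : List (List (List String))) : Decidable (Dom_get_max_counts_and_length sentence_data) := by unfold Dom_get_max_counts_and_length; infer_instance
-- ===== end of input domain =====

-- B replaces A's fused left-to-right loop with a divide-and-conquer recursion (split in half, recurse, combine with max); objective: alternative.


-- ===== PORT A =====
-- fused loop: one pass over sentence_data updating (max_count, max_length) together
def get_max_counts_and_length (sentence_data : List (List (List String))) : Int × Int :=
  sentence_data.foldl
    (fun (acc : Int × Int) sentence_list =>
      let count : Int := sentence_list.length
      let max_count := max count acc.1
      let max_length := sentence_list.foldl
        (fun ml sentence =>
          let length : Int := sentence.length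
          max length ml) acc.2
      (max_count, max_length))
    (0, 0)

-- ===== PORT B =====
-- divide and conquer: sd[:mid] / sd[mid:] with 0 ≤ mid ≤ len are exactly List.take / List.drop;
-- max(map(len, sl), default=0) is foldl max 0 over the lengths (all lengths are ≥ 0)
def get_max_counts_and_length_alt : List (List (List String)) → Int × Int
  | [] => (0, 0)
  | [sentence_list] =>
    ((sentence_list.length : Int),
     (sentence_list.map (fun s => (s.length : Int))).foldl max 0)
  | a :: b :: t =>
    let sd := a :: b :: t
    let mid := sd.length / 2
    let r1 := get_max_counts_and_length_alt (sd.take mid)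
    let r2 := get_max_counts_and_length_alt (sd.drop mid)
    (max r1.1 r2.1, max r1.2 r2.2)
termination_by sd => sd.length
decreasing_by
  · simp [List.length_take]; omega
  · simp [List.length_drop]; omega

-- ===== PRECONDITION & SPEC =====
def Spec_get_max_counts_and_length (sentence_data : List (List (List String))) (out : Int × Int) : Prop := out = get_max_counts_and_length_alt sentence_data
instance (sentence_data : List (List (List String))) (out : Int × Int) : Decidable (Spec_get_max_counts_and_length sentence_data out) := by unfold Spec_get_max_counts_and_length; infer_instance

-- ===== CLAIM (what is proved, stated in full; the proofs are below) =====
def Claim_equal_get_max_counts_and_length : Prop := ∀ (sentence_data : List (List (List String))), Dom_get_max_counts_and_length sentence_data → Spec_get_max_counts_and_length sentence_data (get_max_counts_and_length sentence_data)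

-- ===== LEMMAS AND PROOFS =====

-- abbreviation of A's fold step (proof-side only)
def pvAStep (acc : Int × Int) (sentence_list : List (List String)) : Int × Int :=
  let count : Int := sentence_list.length
  let max_count := max count acc.1
  let max_length := sentence_list.foldl
    (fun ml sentence =>
      let length : Int := sentence.length
      max length ml) acc.2
  (max_count, max_length)

theorem A_eq_fold (sd : List (List (List String))) :
    get_max_counts_and_length sd = sd.foldl pvAStep (0, 0) := rfl

-- A's inner loop equals folding max over the mapped lengths
theorem inner_fold_eq (sl : List (List String)) (b : Int) :
    sl.foldl (fun ml sentence => max ((sentence.length : Int)) ml) b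
      = (sl.map (fun sentence => (sentence.length : Int))).foldl max b := by
  induction sl generalizing b with
  | nil => rfl
  | cons h t ih =>
    simp only [List.foldl_cons, List.map_cons]
    rw [max_comm ((h.length : Int)) b]
    exact ih _

theorem inner_fold_shift (sl : List (List String)) (b : Int) (hb : 0 ≤ b) :
    sl.foldl (fun ml sentence => max ((sentence.length : Int)) ml) b
      = max b ((sl.map (fun s => (s.length : Int))).foldl max 0) := by
  rw [inner_fold_eq]
  induction sl generalizing b with
  | nil => simp; omega
  | cons h t ih =>
    simp only [List.map_cons, List.foldl_cons]
    rw [ih (max b h.length) (by positivity), ih (max 0 h.length) (by positivity)]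
    omega

-- A's fold from a nonnegative accumulator splits off the accumulator with max
theorem fold_shift (sd : List (List (List String))) (a b : Int) (ha : 0 ≤ a) (hb : 0 ≤ b) :
    sd.foldl pvAStep (a, b)
      = (max a (sd.foldl pvAStep (0, 0)).1, max b (sd.foldl pvAStep (0, 0)).2) := by
  induction sd generalizing a b with
  | nil => simp; omega
  | cons h t ih =>
    simp only [List.foldl_cons, pvAStep]
    rw [inner_fold_shift h b hb, inner_fold_shift h 0 le_rfl,
        ih (max (h.length : Int) a) _ (by positivity) (by positivity),
        ih (max (h.length : Int) 0) _ (by positivity) (by positivity)]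
    simp only [Prod.mk.injEq]
    constructor <;> omega

theorem fold_nonneg' (sd : List (List (List String))) (a b : Int) (ha : 0 ≤ a) (hb : 0 ≤ b) :
    0 ≤ (sd.foldl pvAStep (a, b)).1 ∧ 0 ≤ (sd.foldl pvAStep (a, b)).2 := by
  induction sd generalizing a b with
  | nil => simpa using ⟨ha, hb⟩
  | cons h t ih =>
    simp only [List.foldl_cons, pvAStep]
    exact ih _ _ (le_trans ha (le_max_right _ _))
      (by rw [inner_fold_shift h b hb]; exact le_trans hb (le_max_left _ _))

theorem fold_nonneg (sd : List (List (List String))) :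
    0 ≤ (sd.foldl pvAStep (0, 0)).1 ∧ 0 ≤ (sd.foldl pvAStep (0, 0)).2 :=
  fold_nonneg' sd 0 0 le_rfl le_rfl

theorem foldl_max_nonneg (l : List Int) (b : Int) (hb : 0 ≤ b) : 0 ≤ l.foldl max b := by
  induction l generalizing b with
  | nil => simpa
  | cons h t ih => exact ih _ (le_trans hb (le_max_left _ _))

theorem fold_append (s t : List (List (List String))) :
    (s ++ t).foldl pvAStep (0, 0)
      = (max (s.foldl pvAStep (0, 0)).1 (t.foldl pvAStep (0, 0)).1,
         max (s.foldl pvAStep (0, 0)).2 (t.foldl pvAStep (0, 0)).2) := by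
  rw [List.foldl_append, fold_shift t _ _ (fold_nonneg s).1 (fold_nonneg s).2]

-- B equals A's fold, by B's own (strong) recursion
theorem alt_eq_fold (sd : List (List (List String))) :
    get_max_counts_and_length_alt sd = sd.foldl pvAStep (0, 0) := by
  induction sd using get_max_counts_and_length_alt.induct with
  | case1 => simp [get_max_counts_and_length_alt]
  | case2 sl =>
    have hnn := foldl_max_nonneg (sl.map (fun s => (s.length : Int))) 0 le_rfl
    simp only [get_max_counts_and_length_alt, List.foldl_cons, List.foldl_nil, pvAStep]
    rw [inner_fold_shift sl 0 le_rfl]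
    simp only [Prod.mk.injEq]
    constructor <;> omega
  | case3 a b t sd mid ih1 ih2 =>
    rw [get_max_counts_and_length_alt, ih1, ih2]
    conv_rhs => rw [show (a :: b :: t) = sd.take mid ++ sd.drop mid from (List.take_append_drop mid sd).symm]
    rw [fold_append]

-- ===== VERDICT (by name: the statement is the Claim_ definition above) =====
theorem get_max_counts_and_length_spec : Claim_equal_get_max_counts_and_length := by
  intro sd _
  show _ = _
  rw [A_eq_fold, alt_eq_fold]
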